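-- pv_equiv track=rewrite | github.com/billyoftea/ppt-asset-library | scripts/apply_tencent_theme.py | replace_hardcoded_fonts_in_slide
-- ===== SOURCE A (Python) =====
-- FONT_REPLACEMENTS = {
--     # 标题字体
--     "Georgia": "TencentSans W7",
--     # 正文字体
--     "Arial": "TencentSans W3",
-- }
--
-- def replace_hardcoded_fonts_in_slide(xml_content: str) -> str:
--     """替换幻灯片 XML 中硬编码的字体名称"""
--     for old_font, new_font in FONT_REPLACEMENTS.items():
--         xml_content = xml_content.replace(
--             f'typeface="{old_font}"',
--             f'typeface="{new_font}"'
--         )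
--         # 也处理带 pitchFamily 的情况
--         xml_content = xml_content.replace(
--             f'typeface="{old_font}" pitchFamily=',
--             f'typeface="{new_font}" pitchFamily='
--         )
--     return xml_content
-- ===== SOURCE B (Python) =====
-- def replace_hardcoded_fonts_in_slide(xml_content: str) -> str:
--     out = []
--     i, n = 0, len(xml_content)
--     while i < n:
--         if xml_content.startswith('typeface="Georgia"', i):
--             out.append('typeface="TencentSans W7"')
--             i += 18
--         elif xml_content.startswith('typeface="Arial"', i):
--             out.append('typeface="TencentSans W3"')
--             i += 16
--         else:
--             out.append(xml_content[i])
--             i += 1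
--     return ''.join(out)
-- ===== Notes on version B (the rewrite author's own statement) =====
-- stated objective: alternative
-- what changed: A makes four sequential str.replace passes over the string (two of them provably no-ops); B substitutes both font attributes in a single left-to-right scan with startswith tests, building the output once.
import Mathlib
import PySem

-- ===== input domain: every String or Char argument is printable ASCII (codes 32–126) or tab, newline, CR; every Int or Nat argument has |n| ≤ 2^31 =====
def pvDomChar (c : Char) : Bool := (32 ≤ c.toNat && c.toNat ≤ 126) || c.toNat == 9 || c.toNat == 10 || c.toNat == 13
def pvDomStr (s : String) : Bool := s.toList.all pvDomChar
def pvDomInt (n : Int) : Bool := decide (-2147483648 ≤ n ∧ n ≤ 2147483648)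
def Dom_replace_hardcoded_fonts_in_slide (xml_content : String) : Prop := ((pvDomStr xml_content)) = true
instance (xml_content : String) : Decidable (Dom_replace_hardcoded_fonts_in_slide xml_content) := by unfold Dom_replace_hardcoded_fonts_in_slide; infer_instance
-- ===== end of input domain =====

-- B replaces A's four sequential str.replace passes by ONE left-to-right scan that
-- substitutes both font attributes in a single traversal (objective: alternative;
-- the two "pitchFamily" replaces of A are provably no-ops).

-- ===== PORT A =====
-- literal port of A: the dict loop unrolled in insertion order (Georgia, then Arial),
-- each iteration doing its two str.replace calls
def replace_hardcoded_fonts_in_slide (xml_content : String) : String :=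
  let s1 := PySem.Str.replace xml_content "typeface=\"Georgia\"" "typeface=\"TencentSans W7\""
  let s2 := PySem.Str.replace s1 "typeface=\"Georgia\" pitchFamily=" "typeface=\"TencentSans W7\" pitchFamily="
  let s3 := PySem.Str.replace s2 "typeface=\"Arial\"" "typeface=\"TencentSans W3\""
  let s4 := PySem.Str.replace s3 "typeface=\"Arial\" pitchFamily=" "typeface=\"TencentSans W3\" pitchFamily="
  s4

-- ===== PORT B =====
-- the two patterns and their replacements, as char lists
def pvP1 : List Char := "typeface=\"Georgia\"".toList
def pvR1 : List Char := "typeface=\"TencentSans W7\"".toList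
def pvP2 : List Char := "typeface=\"Arial\"".toList
def pvR2 : List Char := "typeface=\"TencentSans W3\"".toList

-- Source B's while-loop (index i, startswith tests, join of parts) as the obvious
-- structural recursion over the character list; i += 18 / 16 / 1 become the drops
def pvScan : List Char → List Char
  | [] => []
  | c :: t =>
    if pvP1.isPrefixOf (c :: t) then pvR1 ++ pvScan (List.drop 17 t)
    else if pvP2.isPrefixOf (c :: t) then pvR2 ++ pvScan (List.drop 15 t)
    else c :: pvScan t
termination_by l => l.length
decreasing_by
  all_goals simp

def replace_hardcoded_fonts_in_slide_alt (xml_content : String) : String :=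
  String.ofList (pvScan xml_content.toList)

-- ===== PRECONDITION & SPEC =====
def Spec_replace_hardcoded_fonts_in_slide (xml_content : String) (out : String) : Prop := out = replace_hardcoded_fonts_in_slide_alt xml_content
instance (xml_content : String) (out : String) : Decidable (Spec_replace_hardcoded_fonts_in_slide xml_content out) := by unfold Spec_replace_hardcoded_fonts_in_slide; infer_instance

-- ===== CLAIM (what is proved, stated in full; the proofs are below) =====
def Claim_equal_replace_hardcoded_fonts_in_slide : Prop := ∀ (xml_content : String), Dom_replace_hardcoded_fonts_in_slide xml_content → Spec_replace_hardcoded_fonts_in_slide xml_content (replace_hardcoded_fonts_in_slide xml_content)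

-- ===== LEMMAS AND PROOFS =====

-- the two "pitchFamily" patterns and replacements of A
def pvP1p : List Char := "typeface=\"Georgia\" pitchFamily=".toList
def pvR1p : List Char := "typeface=\"TencentSans W7\" pitchFamily=".toList
def pvP2p : List Char := "typeface=\"Arial\" pitchFamily=".toList
def pvR2p : List Char := "typeface=\"TencentSans W3\" pitchFamily=".toList

-- fuel-free rendering of PySem.Chars.replace (for old ≠ [])
def pvRep (old new : List Char) : List Char → List Char
  | [] => []
  | c :: t =>
    if old.isPrefixOf (c :: t) then new ++ pvRep old new (List.drop (old.length - 1) t)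
    else c :: pvRep old new t
termination_by l => l.length
decreasing_by
  all_goals simp

-- prefix-of-append dichotomy
lemma pvPA {p a x : List Char} (h : p <+: a ++ x) : p <+: a ∨ a <+: p := by
  rcases Nat.le_total p.length a.length with h1 | h1
  · exact Or.inl (List.prefix_of_prefix_length_le h (a.prefix_append x) h1)
  · exact Or.inr (List.prefix_of_prefix_length_le (a.prefix_append x) h h1)

-- "old never matches starting inside a (with any continuation)"
def pvNC (old a : List Char) : Prop :=
  ∀ j < a.length, ¬ (List.drop j a <+: old) ∧ ¬ (old <+: List.drop j a)

-- "no suffix of q can match into new"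
def pvSep (q r : List Char) : Prop :=
  ∀ m < q.length, ¬ (List.drop m q <+: r) ∧ ¬ (r <+: List.drop m q)

-- decidable (Bool) forms of the two side conditions, for `decide` on the literals
def pvNCb (old a : List Char) : Bool :=
  (List.range a.length).all fun j =>
    !((List.drop j a).isPrefixOf old) && !(old.isPrefixOf (List.drop j a))

def pvSepb (q r : List Char) : Bool :=
  (List.range q.length).all fun m =>
    !((List.drop m q).isPrefixOf r) && !(r.isPrefixOf (List.drop m q))

lemma pvNC_of_b {old a : List Char} (h : pvNCb old a = true) : pvNC old a := by
  intro j hj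
  have := (List.all_eq_true.mp h) j (List.mem_range.mpr hj)
  constructor
  · intro hp; rw [← List.isPrefixOf_iff_prefix] at hp; simp [hp] at this
  · intro hp; rw [← List.isPrefixOf_iff_prefix] at hp; simp [hp] at this

lemma pvSep_of_b {q r : List Char} (h : pvSepb q r = true) : pvSep q r := by
  intro m hm
  have := (List.all_eq_true.mp h) m (List.mem_range.mpr hm)
  constructor
  · intro hp; rw [← List.isPrefixOf_iff_prefix] at hp; simp [hp] at this
  · intro hp; rw [← List.isPrefixOf_iff_prefix] at hp; simp [hp] at this

lemma pvRep_nil (old new : List Char) : pvRep old new [] = [] := by simp [pvRep]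

lemma pvNoPrefix_of_NC {old a : List Char} (h : pvNC old a) (ha : a ≠ []) (t : List Char) :
    ¬ old <+: a ++ t := by
  intro hp
  have h0 := h 0 (by cases a <;> simp_all)
  simp at h0
  rcases pvPA hp with h1 | h1
  · exact h0.2 h1
  · exact h0.1 h1

lemma pvRep_append {old : List Char} (new : List Char) :
    ∀ (a t : List Char), pvNC old a → pvRep old new (a ++ t) = a ++ pvRep old new t := by
  intro a
  induction a with
  | nil => intro t _; simp
  | cons c a' ih =>
    intro t h
    have hnp : ¬ old <+: (c :: a') ++ t := pvNoPrefix_of_NC h (by simp) t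
    have : pvRep old new ((c :: a') ++ t) = c :: pvRep old new (a' ++ t) := by
      rw [List.cons_append, pvRep]
      rw [if_neg (by simpa [List.isPrefixOf_iff_prefix, List.cons_append] using hnp)]
    rw [this, ih t ?_]
    · simp
    · intro j hj
      have := h (j + 1) (by simpa using Nat.succ_lt_succ hj)
      simpa using this

lemma pvRep_self_append {old : List Char} (new t : List Char) (h : old ≠ []) :
    pvRep old new (old ++ t) = new ++ pvRep old new t := by
  obtain ⟨c, o', rfl⟩ : ∃ c o', old = c :: o' := by
    cases old with
    | nil => exact absurd rfl h
    | cons c o' => exact ⟨c, o', rfl⟩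
  rw [show (c :: o') ++ t = c :: (o' ++ t) by simp, pvRep]
  rw [if_pos (by simp [List.isPrefixOf_iff_prefix])]
  simp

-- a (suffix of q)-match in the output of pvRep pulls back to the input
lemma pvU {q old new : List Char} (hsep : pvSep q new) :
    ∀ (n : Nat) (s : List Char), s.length ≤ n → ∀ m < q.length,
      List.drop m q <+: pvRep old new s → List.drop m q <+: s := by
  intro n
  induction n with
  | zero =>
    intro s hs m hm h
    interval_cases hlen : s.length
    rw [List.length_eq_zero_iff] at hlen
    subst hlen
    simpa [pvRep_nil] using h
  | succ n ih =>
    intro s hs m hm h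
    cases s with
    | nil => simpa [pvRep_nil] using h
    | cons c t =>
      rw [pvRep] at h
      split at h
      · rcases pvPA h with h1 | h1
        · exact absurd h1 (hsep m hm).1
        · exact absurd h1 (hsep m hm).2
      · -- output is c :: pvRep old new t
        have hq : List.drop m q = q[m] :: List.drop (m + 1) q := List.drop_eq_getElem_cons hm
        rw [hq, List.cons_prefix_cons] at h
        obtain ⟨hc, htl⟩ := h
        have htail : List.drop (m + 1) q <+: t := by
          by_cases hm1 : m + 1 < q.length
          · exact ih t (by simpa using hs) (m + 1) hm1 htl
          · have : List.drop (m + 1) q = [] := by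
              rw [List.drop_eq_nil_iff]; omega
            simp [this]
        rw [hq, hc]
        exact List.cons_prefix_cons.mpr ⟨rfl, htail⟩

lemma pvU0 {q old new : List Char} (hsep : pvSep q new) (hq : q ≠ []) (s : List Char)
    (h : q <+: pvRep old new s) : q <+: s := by
  have := pvU hsep s.length s le_rfl 0 (by cases q <;> simp_all) (by simpa using h)
  simpa using this

-- PySem.Chars.replace agrees with pvRep for a non-empty pattern
lemma pvGo_eq (old new : List Char) (hold : old ≠ []) :
    ∀ (fuel : Nat) (s acc : List Char), s.length ≤ fuel →
      PySem.Chars.replace.go old new fuel s acc = acc.reverse ++ pvRep old new s := by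
  intro fuel
  induction fuel with
  | zero =>
    intro s acc hs
    have : s = [] := by rwa [← List.length_eq_zero_iff, ← Nat.le_zero]
    subst this
    simp [PySem.Chars.replace.go, pvRep_nil]
  | succ n ih =>
    intro s acc hs
    cases s with
    | nil => simp [PySem.Chars.replace.go, pvRep_nil]
    | cons c t =>
      obtain ⟨d, o', rfl⟩ : ∃ d o', old = d :: o' := by
        cases old with
        | nil => exact absurd rfl hold
        | cons d o' => exact ⟨d, o', rfl⟩
      rw [PySem.Chars.replace.go, pvRep]
      split
      · rw [ih (List.drop (d :: o').length (c :: t)) _ (by simp at hs ⊢; omega)]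
        simp [List.drop_succ_cons]
      · rw [ih t (c :: acc) (by simpa using hs)]
        simp

lemma pvReplace_eq (s old new : List Char) (hold : old ≠ []) :
    PySem.Chars.replace s old new = pvRep old new s := by
  unfold PySem.Chars.replace
  rw [if_neg (by simpa [List.isEmpty_iff] using hold)]
  simpa using pvGo_eq old new hold s.length s [] le_rfl

-- one-step unfoldings of pvScan
lemma pvScan_P1 (t : List Char) : pvScan (pvP1 ++ t) = pvR1 ++ pvScan t := by
  rw [show pvP1 ++ t = 't' :: ("ypeface=\"Georgia\"".toList ++ t) from rfl, pvScan]
  rw [if_pos (by simp [pvP1])]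
  congr 1

lemma pvScan_P2 (t : List Char) : pvScan (pvP2 ++ t) = pvR2 ++ pvScan t := by
  have hnp1 : ¬ pvP1 <+: pvP2 ++ t := by
    intro h
    rcases pvPA h with h1 | h1
    · exact absurd h1 (by decide)
    · exact absurd h1 (by decide)
  rw [show pvP2 ++ t = 't' :: ("ypeface=\"Arial\"".toList ++ t) from rfl, pvScan]
  rw [if_neg (by simpa [List.isPrefixOf_iff_prefix] using hnp1)]
  rw [if_pos (by simp [pvP2])]
  congr 1

lemma pvScan_cons {c : Char} {t : List Char} (h1 : ¬ pvP1 <+: c :: t) (h2 : ¬ pvP2 <+: c :: t) :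
    pvScan (c :: t) = c :: pvScan t := by
  rw [pvScan]
  rw [if_neg (by simpa [List.isPrefixOf_iff_prefix] using h1),
    if_neg (by simpa [List.isPrefixOf_iff_prefix] using h2)]

-- the four replace passes of A, on char lists
def pvChain (s : List Char) : List Char :=
  pvRep pvP2p pvR2p (pvRep pvP2 pvR2 (pvRep pvP1p pvR1p (pvRep pvP1 pvR1 s)))

lemma pvMain : ∀ (n : Nat) (s : List Char), s.length ≤ n → pvChain s = pvScan s := by
  intro n
  induction n with
  | zero =>
    intro s hs
    have : s = [] := by rwa [← List.length_eq_zero_iff, ← Nat.le_zero]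
    subst this
    simp [pvChain, pvRep_nil, pvScan]
  | succ n ih =>
    intro s hs
    cases s with
    | nil => simp [pvChain, pvRep_nil, pvScan]
    | cons c t =>
      by_cases h1 : pvP1 <+: c :: t
      · obtain ⟨t', ht⟩ := h1
        rw [← ht]
        have hlen : t'.length ≤ n := by
          have := congrArg List.length ht
          simp [pvP1] at this ⊢
          simp at hs
          omega
        unfold pvChain
        rw [pvRep_self_append pvR1 t' (by decide),
          pvRep_append pvR1p pvR1 _ (pvNC_of_b (by decide)),
          pvRep_append pvR2 pvR1 _ (pvNC_of_b (by decide)),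
          pvRep_append pvR2p pvR1 _ (pvNC_of_b (by decide)),
          pvScan_P1]
        rw [show pvRep pvP2p pvR2p (pvRep pvP2 pvR2 (pvRep pvP1p pvR1p (pvRep pvP1 pvR1 t'))) = pvChain t' from rfl]
        rw [ih t' hlen]
      · by_cases h2 : pvP2 <+: c :: t
        · obtain ⟨t', ht⟩ := h2
          rw [← ht]
          have hlen : t'.length ≤ n := by
            have := congrArg List.length ht
            simp [pvP2] at this ⊢
            simp at hs
            omega
          unfold pvChain
          rw [pvRep_append pvR1 pvP2 _ (pvNC_of_b (by decide)),
            pvRep_append pvR1p pvP2 _ (pvNC_of_b (by decide)),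
            pvRep_self_append pvR2 _ (by decide),
            pvRep_append pvR2p pvR2 _ (pvNC_of_b (by decide)),
            pvScan_P2]
          rw [show pvRep pvP2p pvR2p (pvRep pvP2 pvR2 (pvRep pvP1p pvR1p (pvRep pvP1 pvR1 t'))) = pvChain t' from rfl]
          rw [ih t' hlen]
        · -- neither pattern matches at this position
          have e1 : pvRep pvP1 pvR1 (c :: t) = c :: pvRep pvP1 pvR1 t := by
            rw [pvRep, if_neg (by simpa [List.isPrefixOf_iff_prefix] using h1)]
          have np1 : ¬ pvP1 <+: c :: pvRep pvP1 pvR1 t := by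
            intro h
            rw [← e1] at h
            exact h1 (pvU0 (pvSep_of_b (by decide)) (by decide) _ h)
          have e2 : pvRep pvP1p pvR1p (c :: pvRep pvP1 pvR1 t)
              = c :: pvRep pvP1p pvR1p (pvRep pvP1 pvR1 t) := by
            rw [pvRep, if_neg ?_]
            simp only [List.isPrefixOf_iff_prefix]
            intro h
            exact np1 (List.IsPrefix.trans (by decide : pvP1 <+: pvP1p) h)
          have np2 : ¬ pvP2 <+: c :: pvRep pvP1p pvR1p (pvRep pvP1 pvR1 t) := by
            intro h
            rw [← e2, ← e1] at h
            exact h2 (pvU0 (q := pvP2) (pvSep_of_b (by decide)) (by decide) _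
              (pvU0 (q := pvP2) (pvSep_of_b (by decide)) (by decide) _ h))
          have e3 : pvRep pvP2 pvR2 (c :: pvRep pvP1p pvR1p (pvRep pvP1 pvR1 t))
              = c :: pvRep pvP2 pvR2 (pvRep pvP1p pvR1p (pvRep pvP1 pvR1 t)) := by
            rw [pvRep, if_neg (by simpa [List.isPrefixOf_iff_prefix] using np2)]
          have e4 : pvRep pvP2p pvR2p (c :: pvRep pvP2 pvR2 (pvRep pvP1p pvR1p (pvRep pvP1 pvR1 t)))
              = c :: pvChain t := by
            rw [pvRep, if_neg ?_]
            · rfl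
            simp only [List.isPrefixOf_iff_prefix]
            intro h
            have hp2 : pvP2 <+: c :: pvRep pvP2 pvR2 (pvRep pvP1p pvR1p (pvRep pvP1 pvR1 t)) :=
              List.IsPrefix.trans (by decide : pvP2 <+: pvP2p) h
            rw [← e3] at hp2
            exact np2 (pvU0 (q := pvP2) (pvSep_of_b (by decide)) (by decide) _ hp2)
          unfold pvChain
          rw [e1, e2, e3, e4, pvScan_cons h1 h2]
          have hlen : t.length ≤ n := by simpa using hs
          rw [ih t hlen]

-- ===== VERDICT (by name: the statement is the Claim_ definition above) =====
theorem replace_hardcoded_fonts_in_slide_spec : Claim_equal_replace_hardcoded_fonts_in_slide := by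
  intro s _
  unfold Spec_replace_hardcoded_fonts_in_slide
  unfold replace_hardcoded_fonts_in_slide replace_hardcoded_fonts_in_slide_alt
  simp only [PySem.Str.replace, String.toList_ofList]
  rw [pvReplace_eq _ _ _ (by decide), pvReplace_eq _ _ _ (by decide),
    pvReplace_eq _ _ _ (by decide), pvReplace_eq _ _ _ (by decide)]
  rw [show pvRep "typeface=\"Arial\" pitchFamily=".toList "typeface=\"TencentSans W3\" pitchFamily=".toList
        (pvRep "typeface=\"Arial\"".toList "typeface=\"TencentSans W3\"".toList
          (pvRep "typeface=\"Georgia\" pitchFamily=".toList "typeface=\"TencentSans W7\" pitchFamily=".toList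
            (pvRep "typeface=\"Georgia\"".toList "typeface=\"TencentSans W7\"".toList s.toList)))
      = pvChain s.toList from rfl]
  rw [pvMain s.toList.length s.toList le_rfl]
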